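-- pv_equiv track=rewrite | github.com/ASSERT-KTH/Mokav | experiments/pynguin/c4b/single-return/generated_tests/src_1929/2/src_1929.py | func
-- ===== SOURCE A (Python) =====
-- def func(*args):
--
-- 	l = 'abcdefgh'
-- 	s = args[0]
-- 	c = 0
-- 	for i in range(8):
-- 	    if (l[i] == s[0]):
-- 	        c += (i + 1)
-- 	f = int(s[1])
-- 	mov = 0
-- 	if (((c == 1) and (f == 1)) or ((c == 8) and (f == 1)) or ((c == 1) and (f == 8)) or ((c == 8) and (f == 8))):
-- 	    mov += 3
-- 	elif ((c == 1) or (c == 8)):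
-- 	    mov += 5
-- 	elif ((f == 1) or (f == 8)):
-- 	    mov += 5
-- 	else:
-- 	    mov += 8
-- 	return(mov)
-- ===== SOURCE B (Python) =====
-- def func(*args):
--     s = args[0]
--     ef = s[0] in 'ah'
--     er = int(s[1]) in (1, 8)
--     return 8 - 3 * (ef + er) + (ef and er)
-- ===== Notes on version B (the rewrite author's own statement) =====
-- stated objective: simpler
-- what changed: B drops A's coordinate machinery (no alphabet-scanning loop to number the file, no 4-way corner/edge/interior branch chain): it tests the file letter and rank directly for edge membership and returns the value by the single branch-free inclusion-exclusion formula 8 - 3*(ef+er) + ef*er.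
import Mathlib
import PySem

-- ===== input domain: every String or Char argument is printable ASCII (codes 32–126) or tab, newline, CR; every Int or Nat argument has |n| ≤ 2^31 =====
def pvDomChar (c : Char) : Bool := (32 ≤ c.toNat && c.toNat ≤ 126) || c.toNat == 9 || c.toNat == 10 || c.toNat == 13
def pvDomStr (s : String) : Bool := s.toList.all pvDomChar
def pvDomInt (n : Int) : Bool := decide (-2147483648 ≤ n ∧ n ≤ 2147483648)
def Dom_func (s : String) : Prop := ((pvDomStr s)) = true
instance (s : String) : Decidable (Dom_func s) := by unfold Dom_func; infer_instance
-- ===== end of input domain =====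

-- B drops A's numeric coordinate extraction (alphabet loop, int(), branch chain) and
-- instead tests the two raw characters for membership in 'ah'/'18', returning
-- 8 - 3*(ef+er) + ef*er branch-free: simpler.

-- ===== PORT A =====
def func (s : String) : Int :=
  let l := "abcdefgh"
  match PySem.Str.pyGet? s 0 with
  | none => 0   -- IndexError: excluded by Pre_func
  | some s0 =>
    let c : Int := (PySem.List.pyRange 0 8 1).foldl (fun c i =>
        match PySem.Str.pyGet? l i with
        | some li => if li == s0 then c + (i + 1) else c
        | none => c) 0
    match PySem.Str.pyGet? s 1 with
    | none => 0   -- IndexError: excluded by Pre_func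
    | some s1 =>
      match PySem.Int.ofStr? (String.ofList [s1]) with
      | none => 0   -- ValueError: excluded by Pre_func
      | some f =>
        if ((c == 1 && f == 1) || (c == 8 && f == 1) || (c == 1 && f == 8) || (c == 8 && f == 8)) then 3
        else if (c == 1 || c == 8) then 5
        else if (f == 1 || f == 8) then 5
        else 8

-- ===== PORT B =====
def func_alt (s : String) : Int :=
  match PySem.Str.pyGet? s 0 with
  | none => 0   -- IndexError: excluded by Pre_func
  | some s0 =>
  match PySem.Str.pyGet? s 1 with
  | none => 0   -- IndexError: excluded by Pre_func
  | some s1 =>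
  match PySem.Int.ofStr? (String.ofList [s1]) with
  | none => 0   -- ValueError: excluded by Pre_func
  | some f =>
    let ef : Int := if PySem.Str.isIn (String.ofList [s0]) "ah" then 1 else 0
    let er : Int := if f == 1 || f == 8 then 1 else 0
    8 - 3 * (ef + er) + (if ef = 1 ∧ er = 1 then 1 else 0)

-- ===== PRECONDITION & SPEC =====
-- A raises IndexError on strings shorter than 2 and ValueError when the second
-- character is not a decimal digit (int(s[1]) fails); Pre_func excludes exactly those.
def Pre_func (s : String) : Prop :=
  2 ≤ s.toList.length ∧ s.toList.getD 1 ' ' ∈ ['0','1','2','3','4','5','6','7','8','9']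
instance (s : String) : Decidable (Pre_func s) := by unfold Pre_func; infer_instance
def pvWitness_func : String := "a1"

def Spec_func (s : String) (out : Int) : Prop := out = func_alt s
instance (s : String) (out : Int) : Decidable (Spec_func s out) := by unfold Spec_func; infer_instance

-- ===== CLAIM (what is proved, stated in full; the proofs are below) =====
def Claim_equal_func : Prop := ∀ (s : String), Dom_func s → Pre_func s → Spec_func s (func s)

-- ===== LEMMAS AND PROOFS =====

set_option maxRecDepth 10000

-- A's column loop computes the file number 1..8, or 0 for a letter outside 'abcdefgh'.
def colOf (s0 : Char) : Int :=
  if s0 = 'a' then 1 else if s0 = 'b' then 2 else if s0 = 'c' then 3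
  else if s0 = 'd' then 4 else if s0 = 'e' then 5 else if s0 = 'f' then 6
  else if s0 = 'g' then 7 else if s0 = 'h' then 8 else 0

theorem col_eq (s0 : Char) :
    ((PySem.List.pyRange 0 8 1).foldl (fun c i =>
        match PySem.Str.pyGet? "abcdefgh" i with
        | some li => if li == s0 then c + (i + 1) else c
        | none => c) (0 : Int)) = colOf s0 := by
  by_cases h1 : s0 = 'a'; · subst h1; decide
  by_cases h2 : s0 = 'b'; · subst h2; decide
  by_cases h3 : s0 = 'c'; · subst h3; decide
  by_cases h4 : s0 = 'd'; · subst h4; decide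
  by_cases h5 : s0 = 'e'; · subst h5; decide
  by_cases h6 : s0 = 'f'; · subst h6; decide
  by_cases h7 : s0 = 'g'; · subst h7; decide
  by_cases h8 : s0 = 'h'; · subst h8; decide
  have hr : PySem.List.pyRange 0 8 1 = [0,1,2,3,4,5,6,7] := by decide
  rw [hr]
  simp only [List.foldl]
  have e0 : PySem.Str.pyGet? "abcdefgh" 0 = some 'a' := by decide
  have e1 : PySem.Str.pyGet? "abcdefgh" 1 = some 'b' := by decide
  have e2 : PySem.Str.pyGet? "abcdefgh" 2 = some 'c' := by decide
  have e3 : PySem.Str.pyGet? "abcdefgh" 3 = some 'd' := by decide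
  have e4 : PySem.Str.pyGet? "abcdefgh" 4 = some 'e' := by decide
  have e5 : PySem.Str.pyGet? "abcdefgh" 5 = some 'f' := by decide
  have e6 : PySem.Str.pyGet? "abcdefgh" 6 = some 'g' := by decide
  have e7 : PySem.Str.pyGet? "abcdefgh" 7 = some 'h' := by decide
  simp only [e0,e1,e2,e3,e4,e5,e6,e7]
  have b1 : ('a' == s0) = false := beq_eq_false_iff_ne.mpr (Ne.symm h1)
  have b2 : ('b' == s0) = false := beq_eq_false_iff_ne.mpr (Ne.symm h2)
  have b3 : ('c' == s0) = false := beq_eq_false_iff_ne.mpr (Ne.symm h3)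
  have b4 : ('d' == s0) = false := beq_eq_false_iff_ne.mpr (Ne.symm h4)
  have b5 : ('e' == s0) = false := beq_eq_false_iff_ne.mpr (Ne.symm h5)
  have b6 : ('f' == s0) = false := beq_eq_false_iff_ne.mpr (Ne.symm h6)
  have b7 : ('g' == s0) = false := beq_eq_false_iff_ne.mpr (Ne.symm h7)
  have b8 : ('h' == s0) = false := beq_eq_false_iff_ne.mpr (Ne.symm h8)
  simp only [b1,b2,b3,b4,b5,b6,b7,b8, Bool.false_eq_true, if_false]
  unfold colOf
  simp [h1,h2,h3,h4,h5,h6,h7,h8]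

-- single-character substring test = character membership
theorem isIn_singleton (c : Char) (t : String) :
    PySem.Str.isIn (String.ofList [c]) t = (c ∈ t.toList : Bool) := by
  have key : PySem.Str.isIn (String.ofList [c]) t = true ↔ c ∈ t.toList := by
    rw [PySem.Str.isIn_iff_infix]
    simpa using List.singleton_infix_iff c t.toList
  by_cases hm : c ∈ t.toList
  · rw [key.mpr hm]; simp [hm]
  · rcases h : PySem.Str.isIn (String.ofList [c]) t with _ | _
    · simp [hm]
    · exact absurd (key.mp h) hm

-- the core equality once both characters are extracted, second one a digit
theorem core_eq (s0 s1 : Char)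
    (hd : s1 ∈ ['0','1','2','3','4','5','6','7','8','9']) :
    (match PySem.Int.ofStr? (String.ofList [s1]) with
      | none => (0 : Int)
      | some f =>
        if ((colOf s0 == 1 && f == 1) || (colOf s0 == 8 && f == 1) ||
            (colOf s0 == 1 && f == 8) || (colOf s0 == 8 && f == 8)) then 3
        else if (colOf s0 == 1 || colOf s0 == 8) then 5
        else if (f == 1 || f == 8) then 5
        else 8)
    = (match PySem.Int.ofStr? (String.ofList [s1]) with
      | none => (0 : Int)
      | some f =>
        let ef : Int := if PySem.Str.isIn (String.ofList [s0]) "ah" then 1 else 0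
        let er : Int := if f == 1 || f == 8 then 1 else 0
        8 - 3 * (ef + er) + (if ef = 1 ∧ er = 1 then 1 else 0)) := by
  rw [isIn_singleton s0 "ah"]
  by_cases h1 : s0 = 'a'; · subst h1; fin_cases hd <;> decide
  by_cases h2 : s0 = 'b'; · subst h2; fin_cases hd <;> decide
  by_cases h3 : s0 = 'c'; · subst h3; fin_cases hd <;> decide
  by_cases h4 : s0 = 'd'; · subst h4; fin_cases hd <;> decide
  by_cases h5 : s0 = 'e'; · subst h5; fin_cases hd <;> decide
  by_cases h6 : s0 = 'f'; · subst h6; fin_cases hd <;> decide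
  by_cases h7 : s0 = 'g'; · subst h7; fin_cases hd <;> decide
  by_cases h8 : s0 = 'h'; · subst h8; fin_cases hd <;> decide
  have hc : colOf s0 = 0 := by unfold colOf; simp [h1,h2,h3,h4,h5,h6,h7,h8]
  have hm : (s0 ∈ "ah".toList : Bool) = false := by
    simp only [show "ah".toList = ['a','h'] from rfl]
    simp [h1, h8]
  rw [hc, hm]
  fin_cases hd <;> decide

-- ===== VERDICT (by name: the statement is the Claim_ definition above) =====
theorem func_spec : Claim_equal_func := by
  intro s _ hpre
  unfold Spec_func func func_alt
  obtain ⟨hlen, hdig⟩ := hpre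
  match hs : s.toList with
  | [] => simp [hs] at hlen
  | [c0] => simp [hs] at hlen
  | c0 :: c1 :: rest =>
    have h0 : PySem.Str.pyGet? s 0 = some c0 := by
      simp [PySem.Str.pyGet?, hs, PySem.Chars.pyGet?, PySem.List.pyGet?_zero_cons]
    have h1 : PySem.Str.pyGet? s 1 = some c1 := by
      simp [PySem.Str.pyGet?, hs, PySem.Chars.pyGet?, PySem.List.pyGet?, PySem.List.pyIdx?]
    have hd : c1 ∈ ['0','1','2','3','4','5','6','7','8','9'] := by
      rw [hs] at hdig; simpa using hdig
    rw [h0, h1]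
    simp only [col_eq c0]
    exact core_eq c0 c1 hd
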